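-- pv_equiv track=rewrite | github.com/AdrianUbedaTouati/IAPlantas | redNueronal.py | dividir_datos_por_planta
-- ===== SOURCE A (Python) =====
-- def dividir_datos_por_planta(datosIOT):
--     datos_por_planta = []
--
--     planta = 1
--     datos_por_planta_desorganizados = []
--     datos_planta = []
--     for datoIOT in datosIOT:
--         if planta != datoIOT[1]:
--             datos_por_planta_desorganizados.append(datos_planta)
--             datos_planta = []
--             planta = datoIOT[1]
--
--         datos_planta.append(datoIOT)
--
--     #ultima planta
--     datos_por_planta_desorganizados.append(datos_planta)
--
--     for datos_planta in datos_por_planta_desorganizados: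
--         datos_por_planta.append(juntar_datos_planta(datos_planta))
--
--     return datos_por_planta
--
-- def juntar_datos_planta(datos_planta):
--     datos_organizados = []
--     contador = 0
--     anterior_sensor = -1;
--     lecturaCompleta = []
--     for datos in datos_planta:
--         # Hay veces que viene el mismo dato de 2 dispositivos distintos veces seguidas super raro, 4 dias depurando
--         if datos[2] != anterior_sensor:
--             contador = contador + 1
--             anterior_sensor = datos[2]
--             lecturaCompleta.append(datos)
--             if contador == 16:
--                 lectura_ordenada = sorted(lecturaCompleta, key=lambda x: x[2])
--                 datos_organizados.append(lectura_ordenada)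
--                 lecturaCompleta = []
--                 contador = 0
--
--     return datos_organizados
-- ===== SOURCE B (Python) =====
-- def dividir_datos_por_planta(datosIOT):
--     # group consecutive readings by plant id (index 1); starting plant is 1,
--     # so a leading empty group appears when the first reading's plant is not 1
--     grupos = []
--     actual = []
--     planta = 1
--     for dato in datosIOT:
--         if planta != dato[1]:
--             grupos.append(actual)
--             actual = []
--             planta = dato[1]
--         actual.append(dato)
--     grupos.append(actual)
--     return [_lotes(grupo) for grupo in grupos]
--
-- def _lotes(grupo):
--     # pass 1: drop every reading whose sensor id (index 2) repeats the
--     # previously kept reading's sensor id (start sentinel -1)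
--     kept = []
--     prev = -1
--     for dato in grupo:
--         if dato[2] != prev:
--             kept.append(dato)
--             prev = dato[2]
--     # pass 2: cut into consecutive chunks of 16 (a short tail is discarded),
--     # each chunk sorted by sensor id
--     lotes = []
--     while len(kept) >= 16:
--         lotes.append(sorted(kept[:16], key=lambda x: x[2]))
--         kept = kept[16:]
--     return lotes
-- ===== Notes on version B (the rewrite author's own statement) =====
-- stated objective: simpler
-- what changed: The interleaved counter/sensor/buffer loop of juntar_datos_planta is replaced by a filter-then-chunk pipeline: one pass dropping consecutive duplicate sensor ids, then slicing into 16-element chunks (short tail discarded) sorted by sensor id.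
import Mathlib
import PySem

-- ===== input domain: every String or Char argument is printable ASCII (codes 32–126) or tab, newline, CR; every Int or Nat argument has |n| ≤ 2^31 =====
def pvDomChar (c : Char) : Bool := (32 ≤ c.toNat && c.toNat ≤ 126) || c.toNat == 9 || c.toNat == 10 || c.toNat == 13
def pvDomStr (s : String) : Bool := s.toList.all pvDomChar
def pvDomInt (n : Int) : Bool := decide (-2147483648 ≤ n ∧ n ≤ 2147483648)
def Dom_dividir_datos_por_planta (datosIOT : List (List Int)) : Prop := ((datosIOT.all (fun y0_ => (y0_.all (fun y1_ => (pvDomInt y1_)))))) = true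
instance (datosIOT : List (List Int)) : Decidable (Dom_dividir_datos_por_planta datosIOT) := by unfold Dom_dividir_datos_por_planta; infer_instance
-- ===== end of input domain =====

-- B replaces A's interleaved counter/sensor/buffer batching loop by a dedup-filter
-- then chunk-into-16 then sort pipeline (same cost; objective: simpler inner pass).


-- ===== PORT A =====
-- loop body of juntar_datos_planta: state (datos_organizados, contador, anterior_sensor, lecturaCompleta)
def juntarStep (st : List (List (List Int)) × Int × Int × List (List Int)) (datos : List Int) :
    List (List (List Int)) × Int × Int × List (List Int) :=
  let (outs, contador, anterior_sensor, lectura) := st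
  if PySem.List.pyGetD datos 2 0 ≠ anterior_sensor then
    let contador := contador + 1
    let anterior_sensor := PySem.List.pyGetD datos 2 0
    let lectura := lectura ++ [datos]
    if contador = 16 then
      (outs ++ [PySem.List.sorted lectura (fun x => PySem.List.pyGetD x 2 0)], 0, anterior_sensor, ([] : List (List Int)))
    else
      (outs, contador, anterior_sensor, lectura)
  else
    (outs, contador, anterior_sensor, lectura)

def juntar_datos_planta (datos_planta : List (List Int)) : List (List (List Int)) :=
  (datos_planta.foldl juntarStep ([], 0, -1, [])).1

-- outer loop body: state (planta, datos_por_planta_desorganizados, datos_planta)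
def dividirStep (st : Int × List (List (List Int)) × List (List Int)) (datoIOT : List Int) :
    Int × List (List (List Int)) × List (List Int) :=
  let (planta, gs, cur) := st
  if planta ≠ PySem.List.pyGetD datoIOT 1 0 then
    (PySem.List.pyGetD datoIOT 1 0, gs ++ [cur], [datoIOT])
  else
    (planta, gs, cur ++ [datoIOT])

def dividir_datos_por_planta (datosIOT : List (List Int)) : List (List (List (List Int))) :=
  let st := datosIOT.foldl dividirStep (1, [], [])
  (st.2.1 ++ [st.2.2]).map juntar_datos_planta

-- ===== PORT B =====
-- pass 1 loop body of _lotes: state (prev, kept)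
def pvDedupStep (st : Int × List (List Int)) (dato : List Int) : Int × List (List Int) :=
  if PySem.List.pyGetD dato 2 0 ≠ st.1 then (PySem.List.pyGetD dato 2 0, st.2 ++ [dato]) else st

-- pass 2 while-loop of _lotes; kept[:16] / kept[16:] with nonneg literal bounds are
-- exactly List.take 16 / List.drop 16 (PySem.List.slice_to_natCast / slice_from_natCast)
def pvLotes16 (kept : List (List Int)) : List (List (List Int)) :=
  if 16 ≤ kept.length then
    PySem.List.sorted (kept.take 16) (fun x => PySem.List.pyGetD x 2 0) :: pvLotes16 (kept.drop 16)
  else []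
termination_by kept.length
decreasing_by simp; omega

def pvLotes (grupo : List (List Int)) : List (List (List Int)) :=
  pvLotes16 (grupo.foldl pvDedupStep (-1, [])).2

def dividir_datos_por_planta_alt (datosIOT : List (List Int)) : List (List (List (List Int))) :=
  let st := datosIOT.foldl dividirStep (1, [], [])
  (st.2.1 ++ [st.2.2]).map pvLotes

-- ===== PRECONDITION & SPEC =====
-- Pre_ excludes inputs containing a reading of fewer than 3 values, on which
-- the Python A raises IndexError at datoIOT[1]/datos[2] (B raises there too).
def Pre_dividir_datos_por_planta (datosIOT : List (List Int)) : Prop :=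
  ∀ d ∈ datosIOT, 3 ≤ d.length
instance (datosIOT : List (List Int)) : Decidable (Pre_dividir_datos_por_planta datosIOT) := by unfold Pre_dividir_datos_por_planta; infer_instance
def pvWitness_dividir_datos_por_planta : List (List Int) := [[1, 1, 2], [1, 1, 3]]

def Spec_dividir_datos_por_planta (datosIOT : List (List Int)) (out : List (List (List (List Int)))) : Prop := out = dividir_datos_por_planta_alt datosIOT
instance (datosIOT : List (List Int)) (out : List (List (List (List Int)))) : Decidable (Spec_dividir_datos_por_planta datosIOT out) := by unfold Spec_dividir_datos_por_planta; infer_instance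

-- ===== CLAIM (what is proved, stated in full; the proofs are below) =====
def Claim_equal_dividir_datos_por_planta : Prop := ∀ (datosIOT : List (List Int)), Dom_dividir_datos_por_planta datosIOT → Pre_dividir_datos_por_planta datosIOT → Spec_dividir_datos_por_planta datosIOT (dividir_datos_por_planta datosIOT)

-- ===== LEMMAS AND PROOFS =====

-- recursive characterisation of B's dedup pass
def dedupF (prev : Int) : List (List Int) → List (List Int)
  | [] => []
  | d :: r => if PySem.List.pyGetD d 2 0 ≠ prev then d :: dedupF (PySem.List.pyGetD d 2 0) r
              else dedupF prev r

theorem dedup_fold (g : List (List Int)) : ∀ (prev : Int) (acc : List (List Int)),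
    (g.foldl pvDedupStep (prev, acc)).2 = acc ++ dedupF prev g := by
  induction g with
  | nil => intro prev acc; simp [dedupF]
  | cons d r ih =>
      intro prev acc
      by_cases h : PySem.List.pyGetD d 2 0 ≠ prev
      · simp [List.foldl_cons, pvDedupStep, dedupF, h, ih]
      · simp [List.foldl_cons, pvDedupStep, dedupF, h, ih]

theorem pvLotes16_short (l : List (List Int)) (h : l.length < 16) : pvLotes16 l = [] := by
  rw [pvLotes16]; simp [Nat.not_le.mpr h]

theorem pvLotes16_cons (c r : List (List Int)) (h : c.length = 16) :
    pvLotes16 (c ++ r) = PySem.List.sorted c (fun x => PySem.List.pyGetD x 2 0) :: pvLotes16 r := by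
  rw [pvLotes16]
  rw [if_pos (by simp [h])]
  rw [List.take_left' h, List.drop_left' h]

theorem juntar_inv (g : List (List Int)) :
    ∀ (out : List (List (List Int))) (prev : Int) (buf : List (List Int)), buf.length < 16 →
    (g.foldl juntarStep (out, (buf.length : Int), prev, buf)).1
      = out ++ pvLotes16 (buf ++ dedupF prev g) := by
  induction g with
  | nil =>
      intro out prev buf hb
      simp [dedupF, pvLotes16_short buf hb]
  | cons d r ih =>
      intro out prev buf hb
      by_cases h : PySem.List.pyGetD d 2 0 ≠ prev
      case pos =>
        by_cases h16 : buf.length = 15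
        · have hlen : (buf ++ [d]).length = 16 := by simp [h16]
          have step : juntarStep (out, (buf.length : Int), prev, buf) d
              = (out ++ [PySem.List.sorted (buf ++ [d]) (fun x => PySem.List.pyGetD x 2 0)],
                 0, PySem.List.pyGetD d 2 0, ([] : List (List Int))) := by
            simp [juntarStep, h, h16]
          rw [List.foldl_cons, step]
          have := ih (out ++ [PySem.List.sorted (buf ++ [d]) (fun x => PySem.List.pyGetD x 2 0)])
            (PySem.List.pyGetD d 2 0) [] (by simp)
          simp only [List.length_nil, Nat.cast_zero] at this
          rw [this]
          rw [dedupF, if_pos h]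
          rw [show buf ++ d :: dedupF (PySem.List.pyGetD d 2 0) r
                = (buf ++ [d]) ++ dedupF (PySem.List.pyGetD d 2 0) r by simp]
          rw [pvLotes16_cons _ _ hlen]
          simp
        · have hlt : (buf ++ [d]).length < 16 := by simp; omega
          have step : juntarStep (out, (buf.length : Int), prev, buf) d
              = (out, ((buf ++ [d]).length : Int), PySem.List.pyGetD d 2 0, buf ++ [d]) := by
            simp [juntarStep, h]
            omega
          rw [List.foldl_cons, step, ih out (PySem.List.pyGetD d 2 0) (buf ++ [d]) hlt]
          rw [dedupF, if_pos h]
          simp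
      case neg =>
        rw [List.foldl_cons]
        have step : juntarStep (out, (buf.length : Int), prev, buf) d
            = (out, (buf.length : Int), prev, buf) := by
          simp [juntarStep, h]
        rw [step, ih out prev buf hb, dedupF, if_neg h]

theorem inner_eq (g : List (List Int)) : juntar_datos_planta g = pvLotes g := by
  unfold juntar_datos_planta pvLotes
  have h1 := juntar_inv g [] (-1) [] (by simp)
  simp only [List.length_nil, Nat.cast_zero, List.nil_append] at h1
  rw [h1, dedup_fold g (-1) []]
  simp

-- ===== VERDICT (by name: the statement is the Claim_ definition above) =====
theorem dividir_datos_por_planta_spec : Claim_equal_dividir_datos_por_planta := by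
  intro datosIOT _ _
  unfold Spec_dividir_datos_por_planta dividir_datos_por_planta dividir_datos_por_planta_alt
  simp only [funext inner_eq]
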